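-- pv_equiv track=rewrite | github.com/liskos/leletko | ege23/85.py | f
-- ===== SOURCE A (Python) =====
-- def f(a, b):
--     if a == b:
--         return 1
--     if a > b:
--         return 0
--     x, y = 0, 0
--     if b % 2 == 0:
--         x = f(a, b//2)
--     if b % 3 == 0:
--         y = f(a, b//3)
--     return f(a, b-1) + x + y
-- ===== SOURCE B (Python) =====
-- def f(a, b):
--     if a > b:
--         return 0
--     w = {a: 1}
--     for n in range(a + 1, b + 1):
--         t = w.get(n - 1, 0)
--         if n % 2 == 0 and n // 2 >= a:
--             t += w.get(n // 2, 0)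
--         if n % 3 == 0 and n // 3 >= a:
--             t += w.get(n // 3, 0)
--         w[n] = t
--     return w.get(b, 0)
-- ===== Notes on version B (the rewrite author's own statement) =====
-- stated objective: faster
-- what changed: Replaced the exponential triple-branch recursion with a single bottom-up dynamic-programming pass that fills a table of path counts for each value from a to b.
import Mathlib
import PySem

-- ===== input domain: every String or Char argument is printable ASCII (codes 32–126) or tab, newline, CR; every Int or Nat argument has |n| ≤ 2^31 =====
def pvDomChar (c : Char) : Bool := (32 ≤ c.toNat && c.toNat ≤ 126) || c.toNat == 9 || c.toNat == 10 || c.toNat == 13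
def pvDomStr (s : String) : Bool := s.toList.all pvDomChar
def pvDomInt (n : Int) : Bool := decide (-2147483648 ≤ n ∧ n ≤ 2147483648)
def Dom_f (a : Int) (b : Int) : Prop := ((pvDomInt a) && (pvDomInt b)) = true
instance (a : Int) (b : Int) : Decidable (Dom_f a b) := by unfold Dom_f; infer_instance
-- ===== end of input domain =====

-- B replaces A's exponential three-way recursion by a linear bottom-up DP table over the values a..b (measurably faster, asymptotic change).

-- ===== PORT A =====
-- Literal port of A's recursion; the fuel argument only makes the recursion total
-- (on Pre_f the depth is bounded by (b-a)+1, proved below), it never changes a computed value.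
def fAux : Nat → Int → Int → Int
  | 0, _, _ => 0
  | fuel + 1, a, b =>
    if a = b then 1
    else if a > b then 0
    else
      fAux fuel a (b - 1)
        + (if PySem.Int.mod b 2 = 0 then fAux fuel a (PySem.Int.floordiv b 2) else 0)
        + (if PySem.Int.mod b 3 = 0 then fAux fuel a (PySem.Int.floordiv b 3) else 0)

def f (a : Int) (b : Int) : Int := fAux ((b - a).toNat + 1) a b

-- ===== PORT B =====
-- one loop iteration: w[n] = w.get(n-1,0) (+ w.get(n//2,0) if reachable) (+ w.get(n//3,0) if reachable)
def fAltStep (a : Int) (w : PySem.Dict Int Int) (n : Int) : PySem.Dict Int Int :=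
  let t := w.getD (n - 1) 0
  let t := if PySem.Int.mod n 2 = 0 ∧ PySem.Int.floordiv n 2 ≥ a then t + w.getD (PySem.Int.floordiv n 2) 0 else t
  let t := if PySem.Int.mod n 3 = 0 ∧ PySem.Int.floordiv n 3 ≥ a then t + w.getD (PySem.Int.floordiv n 3) 0 else t
  w.insert n t

def f_alt (a : Int) (b : Int) : Int :=
  if a > b then 0
  else
    ((PySem.List.pyRange (a + 1) (b + 1) 1).foldl (fAltStep a)
      ((PySem.Dict.empty).insert a 1)).getD b 0

-- ===== PRECONDITION & SPEC =====
-- Pre_f excludes exactly the inputs with a < 0 < b - a + 1 … i.e. a < 0 ∧ a < b, on which the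
-- Python A never returns (the recursion reaches a value v with a < v ≤ 0 and then cycles, e.g.
-- f(a,0) calls f(a,0//2) = f(a,0), raising RecursionError). A returns normally everywhere else.
def Pre_f (a : Int) (b : Int) : Prop := 0 ≤ a ∨ b ≤ a
instance (a : Int) (b : Int) : Decidable (Pre_f a b) := by unfold Pre_f; infer_instance
def pvWitness_f : Int × Int := (0, 6)

def Spec_f (a : Int) (b : Int) (out : Int) : Prop := out = f_alt a b
instance (a : Int) (b : Int) (out : Int) : Decidable (Spec_f a b out) := by unfold Spec_f; infer_instance

-- ===== CLAIM (what is proved, stated in full; the proofs are below) =====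
def Claim_equal_f : Prop := ∀ (a : Int) (b : Int), Dom_f a b → Pre_f a b → Spec_f a b (f a b)

-- ===== LEMMAS AND PROOFS =====

lemma half_bounds (b : Int) (h1 : 1 ≤ b) (h2 : PySem.Int.mod b 2 = 0) :
    PySem.Int.floordiv b 2 ≤ b - 1 ∧ 0 ≤ PySem.Int.floordiv b 2 := by
  rw [PySem.Int.floordiv_eq_ediv_of_pos (by omega)]
  rw [PySem.Int.mod_eq_emod_of_pos (by omega)] at h2
  omega

lemma third_bounds (b : Int) (h1 : 1 ≤ b) (h2 : PySem.Int.mod b 3 = 0) :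
    PySem.Int.floordiv b 3 ≤ b - 1 ∧ 0 ≤ PySem.Int.floordiv b 3 := by
  rw [PySem.Int.floordiv_eq_ediv_of_pos (by omega)]
  rw [PySem.Int.mod_eq_emod_of_pos (by omega)] at h2
  omega

-- with enough fuel the value of fAux does not depend on the fuel (a ≥ 0)
lemma fAux_fuel {a : Int} (ha : 0 ≤ a) :
    ∀ fuel fuel' b, (b - a).toNat < fuel → (b - a).toNat < fuel' →
      fAux fuel a b = fAux fuel' a b := by
  intro fuel
  induction fuel with
  | zero => intro fuel' b h _; omega
  | succ m ih =>
    intro fuel' b h h'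
    match fuel' with
    | 0 => omega
    | m' + 1 =>
      by_cases heq : a = b
      · simp [fAux, heq]
      · by_cases hgt : a > b
        · simp [fAux, heq, hgt]
        · have hab : a < b := by omega
          have hb1 : 1 ≤ b := by omega
          have hm1 : 1 ≤ m := by omega
          have hm1' : 1 ≤ m' := by omega
          simp only [fAux, if_neg heq, if_neg (by omega : ¬ a > b)]
          congr 1
          · congr 1
            · exact ih m' (b - 1) (by omega) (by omega)
            · by_cases h2 : PySem.Int.mod b 2 = 0
              · obtain ⟨hu, hl⟩ := half_bounds b hb1 h2
                simp only [if_pos h2]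
                exact ih m' (PySem.Int.floordiv b 2) (by omega) (by omega)
              · simp only [if_neg h2]
          · by_cases h3 : PySem.Int.mod b 3 = 0
            · obtain ⟨hu, hl⟩ := third_bounds b hb1 h3
              simp only [if_pos h3]
              exact ih m' (PySem.Int.floordiv b 3) (by omega) (by omega)
            · simp only [if_neg h3]

lemma f_base_lt (a b : Int) (h : b < a) : f a b = 0 := by
  have h0 : (b - a).toNat = 0 := by omega
  simp [f, fAux, show a ≠ b by omega, h]

lemma f_base_eq (a : Int) : f a a = 1 := by
  simp [f, fAux]

lemma f_rec {a b : Int} (ha : 0 ≤ a) (hab : a < b) :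
    f a b = f a (b - 1)
      + (if PySem.Int.mod b 2 = 0 then f a (PySem.Int.floordiv b 2) else 0)
      + (if PySem.Int.mod b 3 = 0 then f a (PySem.Int.floordiv b 3) else 0) := by
  have hb1 : 1 ≤ b := by omega
  show fAux ((b - a).toNat + 1) a b = _
  simp only [fAux, if_neg (show ¬ a = b by omega), if_neg (show ¬ a > b by omega)]
  congr 1
  · congr 1
    · exact fAux_fuel ha _ _ (b - 1) (by omega) (by omega)
    · by_cases h2 : PySem.Int.mod b 2 = 0
      · obtain ⟨hu, hl⟩ := half_bounds b hb1 h2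
        simp only [if_pos h2]
        exact fAux_fuel ha _ _ (PySem.Int.floordiv b 2) (by omega) (by omega)
      · simp only [if_neg h2]
  · by_cases h3 : PySem.Int.mod b 3 = 0
    · obtain ⟨hu, hl⟩ := third_bounds b hb1 h3
      simp only [if_pos h3]
      exact fAux_fuel ha _ _ (PySem.Int.floordiv b 3) (by omega) (by omega)
    · simp only [if_neg h3]

-- one DP step preserves the table invariant
lemma inv_step {a n : Int} (ha : 0 ≤ a) (hn : a < n) (w : PySem.Dict Int Int)
    (hw : ∀ k ≤ n - 1, w.getD k 0 = f a k) :
    ∀ k ≤ n, (fAltStep a w n).getD k 0 = f a k := by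
  intro k hk
  have hn1 : 1 ≤ n := by omega
  unfold fAltStep
  rw [PySem.Dict.getD_insert]
  by_cases hkn : k = n
  · rw [if_pos hkn, hkn, f_rec ha hn, ← hw (n - 1) (by omega)]
    have E2 : (if PySem.Int.mod n 2 = 0 then f a (PySem.Int.floordiv n 2) else 0)
        = (if PySem.Int.mod n 2 = 0 ∧ PySem.Int.floordiv n 2 ≥ a
            then w.getD (PySem.Int.floordiv n 2) 0 else 0) := by
      by_cases h2 : PySem.Int.mod n 2 = 0
      · obtain ⟨hu, hl⟩ := half_bounds n hn1 h2
        by_cases hge : PySem.Int.floordiv n 2 ≥ a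
        · rw [if_pos h2, if_pos ⟨h2, hge⟩]
          exact (hw _ (by omega)).symm
        · rw [if_pos h2, if_neg (by tauto), f_base_lt a _ (by omega)]
      · rw [if_neg h2, if_neg (by tauto)]
    have E3 : (if PySem.Int.mod n 3 = 0 then f a (PySem.Int.floordiv n 3) else 0)
        = (if PySem.Int.mod n 3 = 0 ∧ PySem.Int.floordiv n 3 ≥ a
            then w.getD (PySem.Int.floordiv n 3) 0 else 0) := by
      by_cases h3 : PySem.Int.mod n 3 = 0
      · obtain ⟨hu, hl⟩ := third_bounds n hn1 h3
        by_cases hge : PySem.Int.floordiv n 3 ≥ a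
        · rw [if_pos h3, if_pos ⟨h3, hge⟩]
          exact (hw _ (by omega)).symm
        · rw [if_pos h3, if_neg (by tauto), f_base_lt a _ (by omega)]
      · rw [if_neg h3, if_neg (by tauto)]
    rw [E2, E3]
    split_ifs <;> omega
  · rw [if_neg hkn]
    exact hw k (by omega)

lemma loop_inv {a : Int} (ha : 0 ≤ a) :
    ∀ (N : Nat) (m : Int) (w : PySem.Dict Int Int), a ≤ m →
      (∀ k ≤ m, w.getD k 0 = f a k) →
      ∀ k ≤ m + N,
        ((PySem.List.pyRange (m + 1) (m + 1 + N) 1).foldl (fAltStep a) w).getD k 0 = f a k := by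
  intro N
  induction N with
  | zero =>
    intro m w _ hw k hk
    rw [show ((0 : Nat) : Int) = 0 by rfl] at *
    rw [PySem.List.pyRange_one_eq_nil (by omega)]
    exact hw k (by omega)
  | succ N ih =>
    intro m w hm hw k hk
    rw [PySem.List.pyRange_one_cons (by push_cast; omega)]
    simp only [List.foldl_cons]
    have hstep := inv_step ha (show a < m + 1 by omega) w (by intro k hk'; exact hw k (by omega))
    have := ih (m + 1) (fAltStep a w (m + 1)) (by omega) hstep k (by push_cast at hk ⊢; omega)
    rw [show m + 1 + ((N + 1 : Nat) : Int) = m + 1 + 1 + (N : Int) by push_cast; ring]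
    exact this

-- ===== VERDICT (by name: the statement is the Claim_ definition above) =====
theorem f_spec : Claim_equal_f := by
  intro a b _ hpre
  unfold Spec_f f_alt
  by_cases hab : a > b
  · rw [if_pos hab, f_base_lt a b hab]
  · rw [if_neg hab]
    rcases hpre with ha | hba
    · -- 0 ≤ a ≤ b : DP table
      have h0 : ∀ k ≤ a, ((PySem.Dict.empty).insert a 1 : PySem.Dict Int Int).getD k 0 = f a k := by
        intro k hk
        rw [PySem.Dict.getD_insert]
        by_cases hka : k = a
        · rw [if_pos hka, hka, f_base_eq]
        · rw [if_neg hka, f_base_lt a k (by omega)]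
          simp [PySem.Dict.getD_empty]
      have hmain := loop_inv ha (b - a).toNat a _ (le_refl a) h0 b (by omega)
      rw [show a + 1 + (((b - a).toNat : Nat) : Int) = b + 1 by omega] at hmain
      exact hmain.symm
    · -- b ≤ a and ¬ a > b : a = b
      have hba' : a = b := by omega
      subst hba'
      rw [PySem.List.pyRange_one_eq_nil (by omega)]
      simp only [List.foldl_nil]
      rw [PySem.Dict.getD_insert, if_pos rfl, f_base_eq]
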